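-- pv_equiv track=rewrite | github.com/Kullendorff/rpgbot | src/hit_tables.py | get_quadruped_hit_location
-- ===== SOURCE A (Python) =====
-- QUADRUPED_HIT_TABLE = {
--     "framifran": {
--         (1,2):  "huvud",
--         (3,5):  "v_framben",
--         (6,7):  "h_framben",
--         (8,10): "bringa"
--     },
--     "hoger": {
--         (1,2):  "huvud",
--         (3,4):  "framben",
--         (5,6):  "bringa",
--         (7,8):  "buk",
--         (9,10): "bakben"
--     },
--     "vanster": {
--         (1,2):  "huvud",
--         (3,4):  "framben",
--         (5,6):  "bringa",
--         (7,8):  "buk",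
--         (9,10): "bakben"
--     },
--     "bakifran": {
--         (1,6):  "buk",
--         (7,8):  "v_bakben",
--         (9,10): "h_bakben"
--     }
-- }
--
-- def get_quadruped_hit_location(direction: str, roll_1to10: int) -> str:
--     """
--     Tabell R2-48: Träffområden för fyrbenta djur.
--     direction kan vara 'framifran', 'hoger', 'vanster', 'bakifran'.
--     Returnerar en str (t.ex. "huvud", "framben", "bringa", "buk", "bakben" osv.).
--     """
--     if direction not in QUADRUPED_HIT_TABLE:
--         raise ValueError(f"Ogiltig riktning '{direction}' för fyrbent djur.")
--
--     table = QUADRUPED_HIT_TABLE[direction]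
--     for rng, loc in table.items():
--         if isinstance(rng, tuple):
--             if rng[0] <= roll_1to10 <= rng[1]:
--                 return loc
--         else:
--             if rng == roll_1to10:
--                 return loc
--
--     raise ValueError(f"Ogiltigt slag {roll_1to10} i get_quadruped_hit_location.")
-- ===== SOURCE B (Python) =====
-- # B: prebuilt index — each direction maps to a dict keyed by every individual
-- # roll value, so lookup is a direct dict access instead of a range scan.
-- QUADRUPED_HIT_INDEX = {
--     "framifran": {1: "huvud", 2: "huvud", 3: "v_framben", 4: "v_framben",
--                   5: "v_framben", 6: "h_framben", 7: "h_framben",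
--                   8: "bringa", 9: "bringa", 10: "bringa"},
--     "hoger": {1: "huvud", 2: "huvud", 3: "framben", 4: "framben",
--               5: "bringa", 6: "bringa", 7: "buk", 8: "buk",
--               9: "bakben", 10: "bakben"},
--     "vanster": {1: "huvud", 2: "huvud", 3: "framben", 4: "framben",
--                 5: "bringa", 6: "bringa", 7: "buk", 8: "buk",
--                 9: "bakben", 10: "bakben"},
--     "bakifran": {1: "buk", 2: "buk", 3: "buk", 4: "buk", 5: "buk", 6: "buk",
--                  7: "v_bakben", 8: "v_bakben", 9: "h_bakben", 10: "h_bakben"},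
-- }
--
-- def get_quadruped_hit_location(direction: str, roll_1to10: int) -> str:
--     try:
--         table = QUADRUPED_HIT_INDEX[direction]
--     except KeyError:
--         raise ValueError(f"Ogiltig riktning '{direction}' för fyrbent djur.")
--     try:
--         return table[roll_1to10]
--     except KeyError:
--         raise ValueError(f"Ogiltigt slag {roll_1to10} i get_quadruped_hit_location.")
-- ===== Notes on version B (the rewrite author's own statement) =====
-- stated objective: simpler
-- what changed: Replaces the per-call scan over (lo,hi) range keys with a prebuilt index mapping each direction to a dict keyed by every individual roll value, so lookup is a direct dict access with no loop.
import Mathlib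
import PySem

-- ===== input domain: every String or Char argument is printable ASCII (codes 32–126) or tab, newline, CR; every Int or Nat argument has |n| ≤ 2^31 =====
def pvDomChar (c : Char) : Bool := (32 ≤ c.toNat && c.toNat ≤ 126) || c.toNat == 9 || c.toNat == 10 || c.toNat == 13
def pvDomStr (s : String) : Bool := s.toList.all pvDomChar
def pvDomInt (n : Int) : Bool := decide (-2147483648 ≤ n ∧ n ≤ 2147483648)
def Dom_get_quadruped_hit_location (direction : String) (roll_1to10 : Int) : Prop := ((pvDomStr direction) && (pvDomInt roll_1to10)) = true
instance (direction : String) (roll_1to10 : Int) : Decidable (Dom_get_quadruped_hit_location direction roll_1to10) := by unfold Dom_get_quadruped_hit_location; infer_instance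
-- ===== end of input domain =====

-- B replaces A's per-call scan over (lo,hi) ranges by a prebuilt per-roll index dict (objective: simpler lookup structure).
-- Both raise ValueError outside Pre_; equivalence is claimed on the inputs where A returns.

-- ===== PORT A =====
-- A's range table: direction ↦ list of ((lo,hi), location) in insertion order.
def quadrupedHitTable : PySem.Dict String (List ((Int × Int) × String)) :=
  PySem.Dict.ofList [ ("framifran", [((1,2),"huvud"), ((3,5),"v_framben"), ((6,7),"h_framben"), ((8,10),"bringa")])
  , ("hoger",     [((1,2),"huvud"), ((3,4),"framben"), ((5,6),"bringa"), ((7,8),"buk"), ((9,10),"bakben")])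
  , ("vanster",   [((1,2),"huvud"), ((3,4),"framben"), ((5,6),"bringa"), ((7,8),"buk"), ((9,10),"bakben")])
  , ("bakifran",  [((1,6),"buk"), ((7,8),"v_bakben"), ((9,10),"h_bakben")]) ]

-- A's `for rng, loc in table.items()` loop (every key is a tuple, so only the tuple branch fires).
def quadrupedScan (table : List ((Int × Int) × String)) (roll : Int) : Option String :=
  match table with
  | [] => none
  | ((lo, hi), loc) :: rest =>
      if lo ≤ roll ∧ roll ≤ hi then some loc else quadrupedScan rest roll

def get_quadruped_hit_location (direction : String) (roll_1to10 : Int) : String :=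
  match PySem.Dict.get? quadrupedHitTable direction with
  | none => ""  -- A raises ValueError here; outside Pre_
  | some table =>
      match quadrupedScan table roll_1to10 with
      | some loc => loc
      | none => ""  -- A raises ValueError here; outside Pre_

-- ===== PORT B =====
-- B's expanded index: direction ↦ dict keyed by each individual roll value.
def quadrupedHitIndex : PySem.Dict String (PySem.Dict Int String) :=
  PySem.Dict.ofList [ ("framifran", PySem.Dict.ofList [(1,"huvud"),(2,"huvud"),(3,"v_framben"),(4,"v_framben"),(5,"v_framben"),
                   (6,"h_framben"),(7,"h_framben"),(8,"bringa"),(9,"bringa"),(10,"bringa")])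
  , ("hoger",     PySem.Dict.ofList [(1,"huvud"),(2,"huvud"),(3,"framben"),(4,"framben"),(5,"bringa"),(6,"bringa"),
                   (7,"buk"),(8,"buk"),(9,"bakben"),(10,"bakben")])
  , ("vanster",   PySem.Dict.ofList [(1,"huvud"),(2,"huvud"),(3,"framben"),(4,"framben"),(5,"bringa"),(6,"bringa"),
                   (7,"buk"),(8,"buk"),(9,"bakben"),(10,"bakben")])
  , ("bakifran",  PySem.Dict.ofList [(1,"buk"),(2,"buk"),(3,"buk"),(4,"buk"),(5,"buk"),(6,"buk"),
                   (7,"v_bakben"),(8,"v_bakben"),(9,"h_bakben"),(10,"h_bakben")]) ]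

def get_quadruped_hit_location_alt (direction : String) (roll_1to10 : Int) : String :=
  match PySem.Dict.get? quadrupedHitIndex direction with
  | none => ""  -- B raises ValueError here; outside Pre_
  | some table =>
      match PySem.Dict.get? table roll_1to10 with
      | some loc => loc
      | none => ""  -- B raises ValueError here; outside Pre_

-- ===== PRECONDITION & SPEC =====
-- Pre_: exactly the inputs on which A returns (otherwise A raises ValueError; B raises the same ValueError there).
def Pre_get_quadruped_hit_location (direction : String) (roll_1to10 : Int) : Prop :=
  direction ∈ ["framifran", "hoger", "vanster", "bakifran"] ∧ 1 ≤ roll_1to10 ∧ roll_1to10 ≤ 10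
instance (direction : String) (roll_1to10 : Int) : Decidable (Pre_get_quadruped_hit_location direction roll_1to10) := by
  unfold Pre_get_quadruped_hit_location; infer_instance

def pvWitness_get_quadruped_hit_location : String × Int := ("hoger", 7)

def Spec_get_quadruped_hit_location (direction : String) (roll_1to10 : Int) (out : String) : Prop := out = get_quadruped_hit_location_alt direction roll_1to10
instance (direction : String) (roll_1to10 : Int) (out : String) : Decidable (Spec_get_quadruped_hit_location direction roll_1to10 out) := by unfold Spec_get_quadruped_hit_location; infer_instance

-- ===== CLAIM (what is proved, stated in full; the proofs are below) =====
def Claim_equal_get_quadruped_hit_location : Prop := ∀ (direction : String) (roll_1to10 : Int), Dom_get_quadruped_hit_location direction roll_1to10 → Pre_get_quadruped_hit_location direction roll_1to10 → Spec_get_quadruped_hit_location direction roll_1to10 (get_quadruped_hit_location direction roll_1to10)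

-- ===== LEMMAS AND PROOFS =====

-- ===== VERDICT (by name: the statement is the Claim_ definition above) =====
theorem get_quadruped_hit_location_spec : Claim_equal_get_quadruped_hit_location := by
  intro direction roll _ hPre
  obtain ⟨hd, h1, h10⟩ := hPre
  unfold Spec_get_quadruped_hit_location
  interval_cases roll <;>
    (simp only [List.mem_cons, List.not_mem_nil, or_false] at hd;
     rcases hd with h | h | h | h <;> subst h <;> decide)
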